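-- pv_equiv track=rewrite | github.com/pypi-data/pypi-mirror-360 | packages/tk3u8/tk3u8-0.4.0-py3-none-any.whl/tk3u8/core/extractor.py | _are_hls_stream_links_empty
-- ===== SOURCE A (Python) =====
-- def _are_hls_stream_links_empty(stream_links: dict[str, dict[str, str | None]]) -> bool:
--     """
--     Checks whether the all stream links contain similar empty strings.
--     If satisfied, this function returns True and vice versa.
--
--     This is important because there is a tendency that stream links can be empty.
--     Based on testing, this is more likely to happen if you and the user you are
--     trying to download is in different server locations.
--     """
--
--     h264_bool: bool = False
--     h265_bool: bool = False
--
--     for quality in stream_links: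
--         links_by_codec = stream_links[quality]
--
--         for codec, link in links_by_codec.items():
--             if link != "":
--                 continue
--             else:
--                 if codec == "h264":
--                     h264_bool = True
--                 elif codec == "h265":
--                     h265_bool = True
--
--     return all([h264_bool, h265_bool])
-- ===== SOURCE B (Python) =====
-- def _are_hls_stream_links_empty(stream_links: dict[str, dict[str, str | None]]) -> bool:
--     return all(
--         any(links.get(codec) == "" for links in stream_links.values())
--         for codec in ("h264", "h265")
--     )
-- ===== Notes on version B (the rewrite author's own statement) =====
-- stated objective: simpler
-- what changed: Inverted the loop nesting: instead of a quality-outer/codec-inner pass maintaining two boolean flags, B loops over the two target codecs and for each does one existential scan over the quality dicts with .get, combining the two with all(...).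
import Mathlib
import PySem

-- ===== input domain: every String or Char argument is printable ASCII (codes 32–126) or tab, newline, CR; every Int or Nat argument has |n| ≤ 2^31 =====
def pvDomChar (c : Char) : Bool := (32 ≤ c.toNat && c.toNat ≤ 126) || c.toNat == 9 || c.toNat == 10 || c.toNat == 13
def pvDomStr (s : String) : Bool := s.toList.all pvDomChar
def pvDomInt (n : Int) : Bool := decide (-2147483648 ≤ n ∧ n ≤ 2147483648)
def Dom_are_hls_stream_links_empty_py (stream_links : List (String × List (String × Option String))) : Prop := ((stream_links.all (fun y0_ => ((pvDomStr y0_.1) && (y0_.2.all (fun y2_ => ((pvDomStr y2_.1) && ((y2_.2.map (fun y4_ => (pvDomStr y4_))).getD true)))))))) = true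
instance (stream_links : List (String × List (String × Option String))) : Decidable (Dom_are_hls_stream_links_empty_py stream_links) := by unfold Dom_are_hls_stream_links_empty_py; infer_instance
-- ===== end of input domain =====

-- B replaces A's quality-outer/codec-inner pass with two flag accumulators by one
-- targeted existential scan per codec, combined with `all` (objective: simpler).

-- ===== PORT A =====
-- inner loop body: for codec, link in links_by_codec.items(): if link != "": continue else: set the flag
def pvInnerStepA (st : Bool × Bool) (cl : String × Option String) : Bool × Bool :=
  if cl.2 ≠ some "" then st
  else if cl.1 = "h264" then (true, st.2)
  else if cl.1 = "h265" then (st.1, true)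
  else st

-- `stream_links` arrives as the assoc list behind the Python dict; the dict itself is
-- PySem.Dict.ofList of it (last value wins, keys unique), and likewise for each inner dict.
-- `stream_links[quality]` is the item's own value since the dict's keys are unique
-- (PySem.Dict.get?_of_mem_items).
def are_hls_stream_links_empty_py (stream_links : List (String × List (String × Option String))) : Bool :=
  let d := PySem.Dict.ofList stream_links
  let st := d.items.foldl
    (fun st q => (PySem.Dict.ofList q.2).items.foldl pvInnerStepA st)
    (false, false)
  st.1 && st.2

-- ===== PORT B =====
def are_hls_stream_links_empty_py_alt (stream_links : List (String × List (String × Option String))) : Bool :=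
  let d := PySem.Dict.ofList stream_links
  [("h264" : String), "h265"].all fun codec =>
    d.values.any fun links => (PySem.Dict.ofList links).get? codec == some (some "")

-- ===== PRECONDITION & SPEC =====
def Spec_are_hls_stream_links_empty_py (stream_links : List (String × List (String × Option String))) (out : Bool) : Prop := out = are_hls_stream_links_empty_py_alt stream_links
instance (stream_links : List (String × List (String × Option String))) (out : Bool) : Decidable (Spec_are_hls_stream_links_empty_py stream_links out) := by unfold Spec_are_hls_stream_links_empty_py; infer_instance

-- ===== CLAIM (what is proved, stated in full; the proofs are below) =====
def Claim_equal_are_hls_stream_links_empty_py : Prop := ∀ (stream_links : List (String × List (String × Option String))), Dom_are_hls_stream_links_empty_py stream_links → Spec_are_hls_stream_links_empty_py stream_links (are_hls_stream_links_empty_py stream_links)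

-- ===== LEMMAS AND PROOFS =====

-- the inner fold sets each flag iff some pair (codec, "") occurs in the items list
theorem innerFold_eq (cls : List (String × Option String)) (st : Bool × Bool) :
    cls.foldl pvInnerStepA st =
      (st.1 || cls.any (fun cl => cl.1 == "h264" && cl.2 == some ""),
       st.2 || cls.any (fun cl => cl.1 == "h265" && cl.2 == some "")) := by
  induction cls generalizing st with
  | nil => simp
  | cons c rest ih =>
    obtain ⟨b4, b5⟩ := st
    simp only [List.foldl_cons, List.any_cons]
    rw [ih]
    unfold pvInnerStepA
    split_ifs with h1 h2 h3
    · simp [beq_eq_false_iff_ne.mpr h1]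
    · rw [not_ne_iff] at h1
      simp [h1, h2]
    · rw [not_ne_iff] at h1
      simp [h1, h3]
    · simp [beq_eq_false_iff_ne.mpr h2, beq_eq_false_iff_ne.mpr h3]

-- with unique keys, that existential over the items is a get? test
theorem any_items_eq_get? (dd : PySem.Dict String (Option String))
    (hn : dd.keys.Nodup) (k : String) :
    dd.items.any (fun cl => cl.1 == k && cl.2 == some "") =
      (dd.get? k == some (some "")) := by
  rw [Bool.eq_iff_iff]
  simp only [List.any_eq_true, Bool.and_eq_true, beq_iff_eq]
  rw [PySem.Dict.get?_eq_some_iff_mem_items dd k (some "") hn]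
  constructor
  · rintro ⟨⟨a, b⟩, hm, rfl, rfl⟩; exact hm
  · intro hm; exact ⟨(k, some ""), hm, rfl, rfl⟩

theorem outerFold_eq (L : List (String × List (String × Option String))) (st : Bool × Bool) :
    L.foldl (fun st q => (PySem.Dict.ofList q.2).items.foldl pvInnerStepA st) st =
      (st.1 || L.any (fun q => (PySem.Dict.ofList q.2).get? "h264" == some (some "")),
       st.2 || L.any (fun q => (PySem.Dict.ofList q.2).get? "h265" == some (some ""))) := by
  induction L generalizing st with
  | nil => simp
  | cons q rest ih =>
    obtain ⟨b4, b5⟩ := st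
    rw [List.foldl_cons, innerFold_eq, ih]
    simp [any_items_eq_get? _ (PySem.Dict.nodup_keys_ofList _), Bool.or_assoc]

-- ===== VERDICT (by name: the statement is the Claim_ definition above) =====
theorem are_hls_stream_links_empty_py_spec : Claim_equal_are_hls_stream_links_empty_py := by
  intro sl _
  unfold Spec_are_hls_stream_links_empty_py
  unfold are_hls_stream_links_empty_py are_hls_stream_links_empty_py_alt
  simp [outerFold_eq, PySem.Dict.values, List.any_map, Function.comp_def]
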